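-- pv_equiv track=rewrite | github.com/Dean20030514/Renpy-Translator | main.py | build_retranslate_chunks
-- ===== SOURCE A (Python) =====
-- def build_retranslate_chunks(
--     all_lines: list[str],
--     untranslated_indices: list[int],
--     context: int = 3,
--     max_per_chunk: int = 20,
-- ) -> list[list[tuple[int, str, bool]]]:
--     """将漏翻行分组为小 chunk，每个 chunk 附带上下文行。
--
--     对非连续的漏翻行，合并重叠的上下文窗口，用 ``...`` 分隔符标记不连续区域。
--
--     Returns:
--         list of chunks; 每个 chunk 为 [(1-based_lineno, line_content, is_target), ...]
--         分隔行以 lineno=0、content="..." 表示。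
--     """
--     if not untranslated_indices:
--         return []
--
--     target_set = set(untranslated_indices)
--     n_lines = len(all_lines)
--
--     def _merge_ranges(indices: list[int]) -> list[tuple[int, int]]:
--         ranges: list[tuple[int, int]] = []
--         for idx in sorted(indices):
--             lo = max(0, idx - context)
--             hi = min(n_lines - 1, idx + context)
--             if ranges and lo <= ranges[-1][1] + 1:
--                 ranges[-1] = (ranges[-1][0], hi)
--             else:
--                 ranges.append((lo, hi))
--         return ranges
--
--     chunks: list[list[tuple[int, str, bool]]] = []
--     for start in range(0, len(untranslated_indices), max_per_chunk):
--         group = untranslated_indices[start:start + max_per_chunk]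
--         ranges = _merge_ranges(group)
--         chunk_lines: list[tuple[int, str, bool]] = []
--         for ri, (lo, hi) in enumerate(ranges):
--             if ri > 0:
--                 chunk_lines.append((0, "...", False))
--             for idx in range(lo, hi + 1):
--                 chunk_lines.append((idx + 1, all_lines[idx], idx in target_set))
--         chunks.append(chunk_lines)
--
--     return chunks
-- ===== SOURCE B (Python) =====
-- def build_retranslate_chunks(
--     all_lines: list[str],
--     untranslated_indices: list[int],
--     context: int = 3,
--     max_per_chunk: int = 20,
-- ) -> list[list[tuple[int, str, bool]]]:
--     """Single-pass variant: no intermediate ranges list; emits lines while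
--     sweeping each sorted group with a running cursor prev_hi."""
--     if not untranslated_indices:
--         return []
--
--     targets = set(untranslated_indices)
--     n_lines = len(all_lines)
--
--     chunks: list[list[tuple[int, str, bool]]] = []
--     for start in range(0, len(untranslated_indices), max_per_chunk):
--         group = sorted(untranslated_indices[start:start + max_per_chunk])
--         chunk: list[tuple[int, str, bool]] = []
--         prev_hi = None  # hi of the previously processed index, None before the first
--         for idx in group:
--             lo = max(0, idx - context)
--             hi = min(n_lines - 1, idx + context)
--             if prev_hi is None:
--                 emit_from = lo
--             elif lo <= prev_hi + 1:
--                 emit_from = prev_hi + 1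
--             else:
--                 chunk.append((0, "...", False))
--                 emit_from = lo
--             for j in range(emit_from, hi + 1):
--                 chunk.append((j + 1, all_lines[j], j in targets))
--             prev_hi = hi
--         chunks.append(chunk)
--     return chunks
-- ===== Notes on version B (the rewrite author's own statement) =====
-- stated objective: alternative
-- what changed: B fuses A's two phases (build a merged-ranges list, then render it with separators) into a single sweep over each sorted group that emits lines directly while maintaining a running cursor prev_hi, so the intermediate ranges list and the enumerate/render pass disappear.
import Mathlib
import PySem

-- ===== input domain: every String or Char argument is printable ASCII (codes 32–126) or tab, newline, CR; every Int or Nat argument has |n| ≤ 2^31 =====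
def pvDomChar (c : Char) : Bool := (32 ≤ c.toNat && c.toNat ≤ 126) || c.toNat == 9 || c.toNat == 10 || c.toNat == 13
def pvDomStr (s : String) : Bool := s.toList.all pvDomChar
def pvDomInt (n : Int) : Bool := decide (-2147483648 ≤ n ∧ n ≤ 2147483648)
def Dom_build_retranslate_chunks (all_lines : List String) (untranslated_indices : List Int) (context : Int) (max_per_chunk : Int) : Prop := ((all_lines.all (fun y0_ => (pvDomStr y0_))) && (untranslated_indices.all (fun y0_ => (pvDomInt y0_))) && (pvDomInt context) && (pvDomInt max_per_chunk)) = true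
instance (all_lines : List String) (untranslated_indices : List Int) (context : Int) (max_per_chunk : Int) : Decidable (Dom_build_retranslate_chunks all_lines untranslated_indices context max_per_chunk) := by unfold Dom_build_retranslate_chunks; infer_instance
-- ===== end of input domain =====

-- ===== PORT A =====
-- B fuses A's merge-ranges + render phases into one sweep per sorted group (same results; see claim).
-- A raises ValueError (range step 0) when untranslated_indices ≠ [] and max_per_chunk = 0; Pre_ excludes exactly that.

-- shared line-tuple and emission loop (both Pythons append (idx+1, all_lines[idx], idx in targets) over a range)
def pvOut (all_lines : List String) (targets : List Int) (idx : Int) : Int × String × Bool :=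
  (idx + 1, PySem.List.pyGetD all_lines idx "", targets.contains idx)

def pvEmit (all_lines : List String) (targets : List Int) (lo hi : Int)
    (cl : List (Int × String × Bool)) : List (Int × String × Bool) :=
  (PySem.List.pyRange lo (hi + 1) 1).foldl (fun c idx => c ++ [pvOut all_lines targets idx]) cl

-- A's _merge_ranges loop body
def pvMergeStep (context n_lines : Int) (ranges : List (Int × Int)) (idx : Int) : List (Int × Int) :=
  let lo := max 0 (idx - context)
  let hi := min (n_lines - 1) (idx + context)
  let last := PySem.List.pyGetD ranges (-1) (0, 0)
  if ranges ≠ [] ∧ lo ≤ last.2 + 1 then ranges.dropLast ++ [(last.1, hi)]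
  else ranges ++ [(lo, hi)]

-- A's render loop body (over enumerate(ranges))
def pvRenderStep (all_lines : List String) (targets : List Int)
    (cl : List (Int × String × Bool)) (p : Int × Int × Int) : List (Int × String × Bool) :=
  let cl := if 0 < p.1 then cl ++ [((0 : Int), "...", false)] else cl
  pvEmit all_lines targets p.2.1 p.2.2 cl

def build_retranslate_chunks (all_lines : List String) (untranslated_indices : List Int) (context : Int) (max_per_chunk : Int) : List (List (Int × String × Bool)) :=
  if untranslated_indices = [] then []
  else
    let target_set := PySem.Set.ofList untranslated_indices
    let n_lines : Int := all_lines.length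
    (PySem.List.pyRange 0 untranslated_indices.length max_per_chunk).foldl (fun chunks start =>
      let group := PySem.List.slice untranslated_indices (some start) (some (start + max_per_chunk))
      let ranges := (PySem.List.sorted group (fun x => x) false).foldl (pvMergeStep context n_lines) []
      let chunk_lines := (PySem.List.enumerate ranges 0).foldl (pvRenderStep all_lines target_set) []
      chunks ++ [chunk_lines]) []

-- ===== PORT B =====
-- B's fused loop body: running cursor prev_hi instead of a ranges list
def pvStepB (all_lines : List String) (targets : List Int) (context n_lines : Int)
    (s : List (Int × String × Bool) × Option Int) (idx : Int) : List (Int × String × Bool) × Option Int :=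
  let lo := max 0 (idx - context)
  let hi := min (n_lines - 1) (idx + context)
  let r : List (Int × String × Bool) × Int :=
    match s.2 with
    | none => (s.1, lo)
    | some p => if lo ≤ p + 1 then (s.1, p + 1) else (s.1 ++ [((0 : Int), "...", false)], lo)
  (pvEmit all_lines targets r.2 hi r.1, some hi)

def build_retranslate_chunks_alt (all_lines : List String) (untranslated_indices : List Int) (context : Int) (max_per_chunk : Int) : List (List (Int × String × Bool)) :=
  if untranslated_indices = [] then []
  else
    let targets := PySem.Set.ofList untranslated_indices
    let n_lines : Int := all_lines.length
    (PySem.List.pyRange 0 untranslated_indices.length max_per_chunk).foldl (fun chunks start =>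
      let group := PySem.List.sorted (PySem.List.slice untranslated_indices (some start) (some (start + max_per_chunk))) (fun x => x) false
      chunks ++ [(group.foldl (pvStepB all_lines targets context n_lines) ([], none)).1]) []

-- ===== PRECONDITION & SPEC =====
-- Pre_ excludes exactly the inputs where Python A raises: range(0, len, 0) is a ValueError,
-- reached only when untranslated_indices is non-empty and max_per_chunk = 0.
def Pre_build_retranslate_chunks (all_lines : List String) (untranslated_indices : List Int) (context : Int) (max_per_chunk : Int) : Prop :=
  untranslated_indices = [] ∨ max_per_chunk ≠ 0
instance (all_lines : List String) (untranslated_indices : List Int) (context : Int) (max_per_chunk : Int) : Decidable (Pre_build_retranslate_chunks all_lines untranslated_indices context max_per_chunk) := by unfold Pre_build_retranslate_chunks; infer_instance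

def pvWitness_build_retranslate_chunks : List String × List Int × Int × Int :=
  (["alpha", "beta", "gamma", "delta"], [0, 3], 1, 20)

def Spec_build_retranslate_chunks (all_lines : List String) (untranslated_indices : List Int) (context : Int) (max_per_chunk : Int) (out : List (List (Int × String × Bool))) : Prop := out = build_retranslate_chunks_alt all_lines untranslated_indices context max_per_chunk
instance (all_lines : List String) (untranslated_indices : List Int) (context : Int) (max_per_chunk : Int) (out : List (List (Int × String × Bool))) : Decidable (Spec_build_retranslate_chunks all_lines untranslated_indices context max_per_chunk out) := by unfold Spec_build_retranslate_chunks; infer_instance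

-- ===== CLAIM (what is proved, stated in full; the proofs are below) =====
def Claim_equal_build_retranslate_chunks : Prop := ∀ (all_lines : List String) (untranslated_indices : List Int) (context : Int) (max_per_chunk : Int), Dom_build_retranslate_chunks all_lines untranslated_indices context max_per_chunk → Pre_build_retranslate_chunks all_lines untranslated_indices context max_per_chunk → Spec_build_retranslate_chunks all_lines untranslated_indices context max_per_chunk (build_retranslate_chunks all_lines untranslated_indices context max_per_chunk)

-- ===== LEMMAS AND PROOFS =====

-- one context window rendered as a list of tuples
def pvSeg (all_lines : List String) (targets : List Int) (r : Int × Int) : List (Int × String × Bool) :=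
  (PySem.List.pyRange r.1 (r.2 + 1) 1).map (pvOut all_lines targets)

-- A's render of a whole ranges list: first segment, then "..."-prefixed segments
def pvR (all_lines : List String) (targets : List Int) : List (Int × Int) → List (Int × String × Bool)
  | [] => []
  | r :: rest => pvSeg all_lines targets r ++ rest.flatMap (fun r' => ((0 : Int), "...", false) :: pvSeg all_lines targets r')

theorem pvEmit_eq (all_lines : List String) (targets : List Int) (lo hi : Int)
    (cl : List (Int × String × Bool)) :
    pvEmit all_lines targets lo hi cl = cl ++ pvSeg all_lines targets (lo, hi) := by
  simp only [pvEmit, pvSeg]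
  exact PySem.List.foldl_append_singleton_eq_map (pvOut all_lines targets) _ cl

theorem pvRender_tail (all_lines : List String) (targets : List Int) :
    ∀ (rs : List (Int × Int)) (s : Int) (cl : List (Int × String × Bool)), 1 ≤ s →
    (PySem.List.enumerate rs s).foldl (pvRenderStep all_lines targets) cl
      = cl ++ rs.flatMap (fun r' => ((0 : Int), "...", false) :: pvSeg all_lines targets r') := by
  intro rs
  induction rs with
  | nil => intro s cl _; simp [PySem.List.enumerate_nil]
  | cons r rest ih =>
    intro s cl hs
    rw [PySem.List.enumerate_cons]
    simp only [List.foldl_cons]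
    rw [ih (s + 1) _ (by omega)]
    have h0 : (0 : Int) < s := by omega
    simp [pvRenderStep, h0, pvEmit_eq, List.flatMap_cons]

theorem pvRender_eq (all_lines : List String) (targets : List Int) (rs : List (Int × Int)) :
    (PySem.List.enumerate rs 0).foldl (pvRenderStep all_lines targets) []
      = pvR all_lines targets rs := by
  cases rs with
  | nil => simp [PySem.List.enumerate_nil, pvR]
  | cons r rest =>
    rw [PySem.List.enumerate_cons]
    simp only [List.foldl_cons]
    rw [pvRender_tail all_lines targets rest (0 + 1) _ (by omega)]
    simp [pvRenderStep, pvEmit_eq, pvR]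

theorem pvR_append (all_lines : List String) (targets : List Int) (rs : List (Int × Int))
    (hrs : rs ≠ []) (r : Int × Int) :
    pvR all_lines targets (rs ++ [r])
      = pvR all_lines targets rs ++ ((0 : Int), "...", false) :: pvSeg all_lines targets r := by
  cases rs with
  | nil => exact absurd rfl hrs
  | cons r0 rest => simp [pvR, List.flatMap_append]

theorem pvSeg_split (all_lines : List String) (targets : List Int) (l0 h h' : Int)
    (h1 : l0 ≤ h + 1) (h2 : h ≤ h') :
    pvSeg all_lines targets (l0, h')
      = pvSeg all_lines targets (l0, h) ++ (PySem.List.pyRange (h + 1) (h' + 1) 1).map (pvOut all_lines targets) := by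
  simp only [pvSeg]
  rw [PySem.List.pyRange_one_append l0 (h + 1) (h' + 1) (by omega) (by omega), List.map_append]

theorem pvR_extend (all_lines : List String) (targets : List Int) (rs : List (Int × Int))
    (l0 h h' : Int) (h1 : l0 ≤ h + 1) (h2 : h ≤ h') :
    pvR all_lines targets (rs ++ [(l0, h')])
      = pvR all_lines targets (rs ++ [(l0, h)]) ++ (PySem.List.pyRange (h + 1) (h' + 1) 1).map (pvOut all_lines targets) := by
  cases rs with
  | nil => simpa [pvR] using pvSeg_split all_lines targets l0 h h' h1 h2
  | cons r0 rest =>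
    rw [pvR_append all_lines targets _ (by simp) (l0, h'),
        pvR_append all_lines targets _ (by simp) (l0, h),
        pvSeg_split all_lines targets l0 h h' h1 h2]
    simp

-- the main fused-loop invariant: after any prefix, B's chunk is A's render of A's ranges,
-- and B's cursor is the hi of the last processed index
theorem pvMain (all_lines : List String) (targets : List Int) (context n_lines : Int) :
    ∀ (l : List Int) (e : Int), (e :: l).Pairwise (· ≤ ·) →
    ∀ (rs : List (Int × Int)) (l0 : Int), l0 ≤ max 0 (e - context) →
    (l.foldl (pvStepB all_lines targets context n_lines)
        (pvR all_lines targets (rs ++ [(l0, min (n_lines - 1) (e + context))]),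
         some (min (n_lines - 1) (e + context)))).1
      = pvR all_lines targets
          (l.foldl (pvMergeStep context n_lines) (rs ++ [(l0, min (n_lines - 1) (e + context))])) := by
  intro l
  induction l with
  | nil => intro e _ rs l0 _; simp
  | cons x l' ih =>
    intro e hp rs l0 hl0
    have hex : e ≤ x := (List.pairwise_cons.1 hp).1 x (by simp)
    have hp' : (x :: l').Pairwise (· ≤ ·) := (List.pairwise_cons.1 hp).2
    simp only [List.foldl_cons]
    by_cases hm : max 0 (x - context) ≤ min (n_lines - 1) (e + context) + 1
    · -- merge: A extends the last range in place, B continues emitting from the cursor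
      have hA : pvMergeStep context n_lines (rs ++ [(l0, min (n_lines - 1) (e + context))]) x
          = rs ++ [(l0, min (n_lines - 1) (x + context))] := by
        simp only [pvMergeStep, PySem.List.pyGetD_neg_one_append_singleton]
        rw [if_pos ⟨by simp, hm⟩, List.dropLast_concat]
      have hB : pvStepB all_lines targets context n_lines
          (pvR all_lines targets (rs ++ [(l0, min (n_lines - 1) (e + context))]),
           some (min (n_lines - 1) (e + context))) x
          = (pvR all_lines targets (rs ++ [(l0, min (n_lines - 1) (x + context))]),
             some (min (n_lines - 1) (x + context))) := by
        simp only [pvStepB]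
        rw [if_pos hm, pvEmit_eq,
            pvR_extend all_lines targets rs l0 (min (n_lines - 1) (e + context))
              (min (n_lines - 1) (x + context)) (by omega) (by omega)]
        simp [pvSeg]
      rw [hA, hB]
      exact ih x hp' rs l0 (by omega)
    · -- new range: A appends (lo,hi), B emits a separator and the fresh window
      have hA : pvMergeStep context n_lines (rs ++ [(l0, min (n_lines - 1) (e + context))]) x
          = (rs ++ [(l0, min (n_lines - 1) (e + context))])
              ++ [(max 0 (x - context), min (n_lines - 1) (x + context))] := by
        simp only [pvMergeStep, PySem.List.pyGetD_neg_one_append_singleton]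
        rw [if_neg (by rintro ⟨-, h2⟩; omega)]
      have hB : pvStepB all_lines targets context n_lines
          (pvR all_lines targets (rs ++ [(l0, min (n_lines - 1) (e + context))]),
           some (min (n_lines - 1) (e + context))) x
          = (pvR all_lines targets ((rs ++ [(l0, min (n_lines - 1) (e + context))])
              ++ [(max 0 (x - context), min (n_lines - 1) (x + context))]),
             some (min (n_lines - 1) (x + context))) := by
        simp only [pvStepB]
        rw [if_neg hm, pvEmit_eq,
            pvR_append all_lines targets _ (by simp)
              (max 0 (x - context), min (n_lines - 1) (x + context))]
        simp
      rw [hA, hB]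
      exact ih x hp' (rs ++ [(l0, min (n_lines - 1) (e + context))]) (max 0 (x - context)) (le_refl _)

theorem pvGroup (all_lines : List String) (targets : List Int) (context n_lines : Int)
    (g : List Int) :
    (PySem.List.enumerate ((PySem.List.sorted g (fun x => x) false).foldl (pvMergeStep context n_lines) []) 0).foldl
        (pvRenderStep all_lines targets) []
      = ((PySem.List.sorted g (fun x => x) false).foldl (pvStepB all_lines targets context n_lines) ([], none)).1 := by
  rw [pvRender_eq]
  have hp : (PySem.List.sorted g (fun x => x) false).Pairwise (· ≤ ·) :=
    PySem.List.sorted_pairwise g (fun x => x)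
  cases hs : PySem.List.sorted g (fun x => x) false with
  | nil => simp [pvR]
  | cons x rest =>
    rw [hs] at hp
    simp only [List.foldl_cons]
    have hA0 : pvMergeStep context n_lines [] x
        = [] ++ [(max 0 (x - context), min (n_lines - 1) (x + context))] := by
      simp [pvMergeStep]
    have hB0 : pvStepB all_lines targets context n_lines ([], none) x
        = (pvR all_lines targets ([] ++ [(max 0 (x - context), min (n_lines - 1) (x + context))]),
           some (min (n_lines - 1) (x + context))) := by
      simp [pvStepB, pvEmit_eq, pvR, pvSeg]
    rw [hA0, hB0, pvMain all_lines targets context n_lines rest x hp [] _ (le_refl _)]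

-- ===== VERDICT (by name: the statement is the Claim_ definition above) =====
theorem build_retranslate_chunks_spec : Claim_equal_build_retranslate_chunks := by
  intro all_lines untranslated_indices context max_per_chunk _ _
  unfold Spec_build_retranslate_chunks build_retranslate_chunks build_retranslate_chunks_alt
  by_cases h : untranslated_indices = []
  · simp [h]
  · rw [if_neg h, if_neg h]
    refine PySem.List.foldl_congr_mem _ _ _ _ ?_
    intro acc start _
    show acc ++ [_] = acc ++ [_]
    rw [pvGroup all_lines (PySem.Set.ofList untranslated_indices) context (all_lines.length : Int)
        (PySem.List.slice untranslated_indices (some start) (some (start + max_per_chunk)))]
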